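-- pv_equiv track=rewrite | github.com/k-sap/Corneferencer | corneferencer/inout/mmax.py | get_mention_start
-- ===== SOURCE A (Python) =====
-- def word_to_ignore(word):
--     if word['ctag'] == 'interp':
--         return True
--     return False
--
-- def get_mention_start(first_word, words):
--     start = 0
--     for word in words:
--         if not word_to_ignore(word):
--             start += 1
--         if word['id'] == first_word['id']:
--             break
--     return start
-- ===== SOURCE B (Python) =====
-- def get_mention_start(first_word, words):
--     cut = len(words)
--     for i, w in enumerate(words):
--         if w['id'] == first_word['id']:
--             cut = i + 1
--             break
--     ctags = [w['ctag'] for w in words[:cut]]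
--     return cut - ctags.count('interp')
-- ===== Notes on version B (the rewrite author's own statement) =====
-- stated objective: alternative
-- what changed: A fuses the scan and the count in one loop with a running non-interp counter; B instead locates the 1-based cut position of the target id (defaulting to len(words)), extracts the ctags of that slice, and derives the answer arithmetically as cut minus the count of 'interp' ctags.
import Mathlib
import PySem

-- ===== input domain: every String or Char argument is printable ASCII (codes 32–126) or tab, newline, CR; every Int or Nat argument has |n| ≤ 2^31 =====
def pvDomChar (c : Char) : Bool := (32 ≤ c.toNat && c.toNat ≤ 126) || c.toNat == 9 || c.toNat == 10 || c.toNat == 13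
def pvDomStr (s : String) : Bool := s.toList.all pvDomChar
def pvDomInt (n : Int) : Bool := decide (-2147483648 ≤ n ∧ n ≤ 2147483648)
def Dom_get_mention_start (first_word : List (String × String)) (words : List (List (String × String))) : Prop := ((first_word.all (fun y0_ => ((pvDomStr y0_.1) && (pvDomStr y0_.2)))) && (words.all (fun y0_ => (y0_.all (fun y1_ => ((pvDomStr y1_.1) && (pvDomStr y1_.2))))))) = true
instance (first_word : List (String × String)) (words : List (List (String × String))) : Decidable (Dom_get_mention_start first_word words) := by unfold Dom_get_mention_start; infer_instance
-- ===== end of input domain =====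

-- ===== PORT A =====
-- B locates the 1-based cut position of the target id (or len(words) if absent), then
-- derives the answer arithmetically as cut minus the number of 'interp' ctags in the
-- slice words[:cut]; A fuses scan and count in one loop. Same cost, different algorithm shape.
-- dict lookups word['ctag'] / word['id'] / first_word['id'] may raise KeyError in Python;
-- the ports thread Option (none = KeyError) and Pre_ excludes exactly those inputs.

-- word_to_ignore(word): True iff word['ctag'] == 'interp'; none where Python raises KeyError
def word_to_ignore (word : List (String × String)) : Option Bool :=
  ((PySem.Dict.mk word).get? "ctag").map (fun c => c = "interp")

def get_mention_start_loop (first_word : List (String × String)) :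
    List (List (String × String)) → Int → Option Int
  | [], start => some start
  | word :: rest, start =>
    match word_to_ignore word with
    | none => none
    | some ig =>
      let start' := if ig = false then start + 1 else start
      match (PySem.Dict.mk word).get? "id", (PySem.Dict.mk first_word).get? "id" with
      | some wid, some fid =>
        if wid = fid then some start' else get_mention_start_loop first_word rest start'
      | _, _ => none

def get_mention_start (first_word : List (String × String)) (words : List (List (String × String))) : Int :=
  (get_mention_start_loop first_word words 0).getD 0

-- ===== PORT B =====
-- the for/enumerate loop of Source B: walk `words` with the running index i, returning i+1 at the
-- first word whose 'id' equals first_word['id'], and the index reached (= len(words)) at the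
-- end of the list; none where a lookup raises KeyError
def pvFindCut (first_word : List (String × String)) :
    List (List (String × String)) → Nat → Option Nat
  | [], i => some i
  | w :: ws, i =>
    match (PySem.Dict.mk w).get? "id", (PySem.Dict.mk first_word).get? "id" with
    | some wid, some fid =>
      if wid = fid then some (i + 1) else pvFindCut first_word ws (i + 1)
    | _, _ => none

-- ctags = [w['ctag'] for w in words[:cut]]; none where a lookup raises KeyError
def pvCtags : List (List (String × String)) → Option (List String)
  | [] => some []
  | w :: ws =>
    match (PySem.Dict.mk w).get? "ctag" with
    | some c => (pvCtags ws).map (c :: ·)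
    | none => none

def get_mention_start_alt (first_word : List (String × String)) (words : List (List (String × String))) : Int :=
  match pvFindCut first_word words 0 with
  | none => 0
  | some cut =>
    -- words[:cut] with 0 ≤ cut ≤ len(words): List.take is exact for Python's slice here
    match pvCtags (words.take cut) with
    | some cs => (cut : Int) - (cs.count "interp" : Int)
    | none => 0

-- ===== PRECONDITION & SPEC =====
-- Pre_ excludes exactly the inputs where the Python raises KeyError: a missing 'ctag'/'id'
-- key in a SCANNED word (one up to and including the first whose 'id' equals first_word's),
-- or 'id' missing from first_word while words is nonempty. Words after the match are free.
def Pre_get_mention_start (first_word : List (String × String)) (words : List (List (String × String))) : Prop :=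
  (words = [] ∨ ((PySem.Dict.mk first_word).get? "id").isSome = true) ∧
  ∀ w ∈ words.take ((words.takeWhile (fun w => (PySem.Dict.mk w).get? "id" != (PySem.Dict.mk first_word).get? "id")).length + 1),
    ((PySem.Dict.mk w).get? "ctag").isSome = true ∧ ((PySem.Dict.mk w).get? "id").isSome = true
instance (first_word : List (String × String)) (words : List (List (String × String))) : Decidable (Pre_get_mention_start first_word words) := by unfold Pre_get_mention_start; infer_instance

def pvWitness_get_mention_start : (List (String × String)) × (List (List (String × String))) :=
  ([("id", "w2")], [[("id", "w1"), ("ctag", "subst")], [("id", "w2"), ("ctag", "interp")]])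

def Spec_get_mention_start (first_word : List (String × String)) (words : List (List (String × String))) (out : Int) : Prop := out = get_mention_start_alt first_word words
instance (first_word : List (String × String)) (words : List (List (String × String))) (out : Int) : Decidable (Spec_get_mention_start first_word words out) := by unfold Spec_get_mention_start; infer_instance

-- ===== CLAIM (what is proved, stated in full; the proofs are below) =====
def Claim_equal_get_mention_start : Prop := ∀ (first_word : List (String × String)) (words : List (List (String × String))), Dom_get_mention_start first_word words → Pre_get_mention_start first_word words → Spec_get_mention_start first_word words (get_mention_start first_word words)

-- ===== LEMMAS AND PROOFS =====

-- A's fused loop started at `start` computes start + (cut - #interp in the slice), the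
-- quantity B assembles from its two passes
theorem loop_eq_cut_count (first_word : List (String × String)) (fid : String)
    (hfid : (PySem.Dict.mk first_word).get? "id" = some fid) :
    ∀ (ws : List (List (String × String))) (start : Int),
      (∀ w ∈ ws.take ((ws.takeWhile (fun w => (PySem.Dict.mk w).get? "id" != (PySem.Dict.mk first_word).get? "id")).length + 1),
        ((PySem.Dict.mk w).get? "ctag").isSome = true ∧ ((PySem.Dict.mk w).get? "id").isSome = true) →
      ∃ (cut : Nat) (cs : List String),
        pvFindCut first_word ws 0 = some cut ∧
        pvCtags (ws.take cut) = some cs ∧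
        get_mention_start_loop first_word ws start
          = some (start + ((cut : Int) - (cs.count "interp" : Int))) := by
  intro ws
  induction ws with
  | nil =>
    intro start _
    exact ⟨0, [], rfl, rfl, by simp [get_mention_start_loop]⟩
  | cons w rest ih =>
    intro start hkeys
    obtain ⟨hcs, hids⟩ := hkeys w (by simp [List.take_succ_cons])
    obtain ⟨c, hc⟩ := Option.isSome_iff_exists.mp hcs
    obtain ⟨wid, hid⟩ := Option.isSome_iff_exists.mp hids
    by_cases hm : wid = fid
    · refine ⟨1, [c], ?_, ?_, ?_⟩
      · simp [pvFindCut, hid, hfid, hm]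
      · simp [pvCtags, hc]
      · by_cases hig : c = "interp" <;>
          simp [get_mention_start_loop, word_to_ignore, hc, hid, hfid, hm, hig]
    · have hP : ((PySem.Dict.mk w).get? "id" != (PySem.Dict.mk first_word).get? "id") = true := by
        simp [hid, hfid, hm]
      have hrest : ∀ x ∈ rest.take ((rest.takeWhile (fun w => (PySem.Dict.mk w).get? "id" != (PySem.Dict.mk first_word).get? "id")).length + 1),
          ((PySem.Dict.mk x).get? "ctag").isSome = true ∧ ((PySem.Dict.mk x).get? "id").isSome = true := by
        intro x hx
        apply hkeys
        simp only [List.takeWhile_cons, hP, if_true, List.length_cons, List.take_succ_cons,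
          List.mem_cons]
        exact Or.inr hx
      set start' := if c = "interp" then start else start + 1 with hstart'
      obtain ⟨cut, cs, hcut, hctags, hloop⟩ := ih start' hrest
      -- shift the find index from 0 to 1
      have hshift : ∀ (l : List (List (String × String))) (i : Nat),
          pvFindCut first_word l i = (pvFindCut first_word l 0).map (i + ·) := by
        intro l
        induction l with
        | nil => intro i; simp [pvFindCut]
        | cons x xs ihx =>
          intro i
          simp only [pvFindCut]
          cases hx : (PySem.Dict.mk x).get? "id" with
          | none => simp
          | some xid =>
            rw [hfid]
            by_cases hxm : xid = fid
            · simp [hxm]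
            · simp only [if_neg hxm, ihx (i + 1), ihx 1]
              cases pvFindCut first_word xs 0 <;> simp <;> omega
      refine ⟨cut + 1, c :: cs, ?_, ?_, ?_⟩
      · simp only [pvFindCut, hid, hfid, if_neg hm, hshift rest 1, hcut]
        simp [Nat.add_comm]
      · simp [List.take_succ_cons, pvCtags, hc, hctags]
      · have hhead : get_mention_start_loop first_word (w :: rest) start
            = get_mention_start_loop first_word rest start' := by
          by_cases hig : c = "interp" <;>
            simp [get_mention_start_loop, word_to_ignore, hc, hid, hfid, hm, hig, hstart']
        rw [hhead, hloop]
        congr 1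
        by_cases hig : c = "interp" <;>
          simp [hig, hstart'] <;> omega
theorem get_mention_start_eq (first_word : List (String × String)) (words : List (List (String × String)))
    (hpre : Pre_get_mention_start first_word words) :
    get_mention_start first_word words = get_mention_start_alt first_word words := by
  obtain ⟨hfw, hkeys⟩ := hpre
  cases words with
  | nil => rfl
  | cons w ws =>
    have hfid : ((PySem.Dict.mk first_word).get? "id").isSome = true := by
      cases hfw with
      | inl h => cases h
      | inr h => exact h
    obtain ⟨fid, hfid⟩ := Option.isSome_iff_exists.mp hfid
    obtain ⟨cut, cs, hcut, hctags, hloop⟩ :=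
      loop_eq_cut_count first_word fid hfid (w :: ws) 0 hkeys
    unfold get_mention_start get_mention_start_alt
    rw [hloop]
    simp [hcut, hctags]

-- ===== VERDICT (by name: the statement is the Claim_ definition above) =====
theorem get_mention_start_spec : Claim_equal_get_mention_start := by
  intro fw ws _ hpre
  unfold Spec_get_mention_start
  exact get_mention_start_eq fw ws hpre
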